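-- pv_equiv track=rewrite | github.com/wei2912/idc | find_dist/find_exts.py | filter_ps
-- ===== SOURCE A (Python) =====
-- def filter_ps(ps):
--     """
--     ps -> List of paths
--
--     Out of all the paths, select only the lowest weight paths that lead to the same end.
--     """
--     best_ps = {}
--     for p in ps:
--         w_4 = p[0][1]
--         w_5 = p[1][1]
--         x = (w_4 + w_5, w_4)
--
--         state_5 = p[1][0]
--         if (state_5 not in best_ps) or (x < best_ps[state_5][0]):
--             best_ps[state_5] = (x, [p])
--         elif x == best_ps[state_5][0]:
--             best_ps[state_5][1].append(p)
--     return [p for state_5 in best_ps for p in best_ps[state_5][1]]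
-- ===== SOURCE B (Python) =====
-- def filter_ps(ps):
--     """
--     ps -> List of paths
--
--     Out of all the paths, select only the lowest weight paths that lead to the same end.
--     """
--     best_w = {}
--     for p in ps:
--         x = (p[0][1] + p[1][1], p[0][1])
--         s = p[1][0]
--         if s not in best_w or x < best_w[s]:
--             best_w[s] = x
--     return [p
--             for s in best_w
--             for p in ps
--             if p[1][0] == s and (p[0][1] + p[1][1], p[0][1]) == best_w[s]]
-- ===== Notes on version B (the rewrite author's own statement) =====
-- stated objective: alternative
-- what changed: Replaces A's single track-and-reset pass (dict of (best-x, growing path list) with in-place resets/appends) by two separate phases: one pass building only a min-weight table best_w per end state, then a grouped filter comprehension over ps that re-emits, per state in first-appearance order, the paths whose recomputed weight equals the table minimum.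
import Mathlib
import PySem

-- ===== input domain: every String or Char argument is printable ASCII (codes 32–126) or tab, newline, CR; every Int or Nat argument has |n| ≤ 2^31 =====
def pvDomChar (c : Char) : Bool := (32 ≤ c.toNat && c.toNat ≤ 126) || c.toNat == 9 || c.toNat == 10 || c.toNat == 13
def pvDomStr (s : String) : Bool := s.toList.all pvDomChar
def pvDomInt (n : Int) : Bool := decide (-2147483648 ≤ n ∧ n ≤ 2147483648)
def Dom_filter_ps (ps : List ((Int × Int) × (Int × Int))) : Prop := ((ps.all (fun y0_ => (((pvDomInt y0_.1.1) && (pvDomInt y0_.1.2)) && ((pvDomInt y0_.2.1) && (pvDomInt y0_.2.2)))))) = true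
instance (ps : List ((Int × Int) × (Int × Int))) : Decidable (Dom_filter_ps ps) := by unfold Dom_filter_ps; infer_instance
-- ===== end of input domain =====

-- B replaces A's single track-and-reset pass by a min-table pass plus a grouped filter
-- comprehension (alternative decomposition, same return value).

-- Python tuple comparison 'x < y' on pairs of ints (lexicographic), used by both programs.
def pvLtX (a b : Int × Int) : Bool := a.1 < b.1 || (a.1 == b.1 && a.2 < b.2)

-- ===== PORT A =====
-- loop body of A's single pass (the Python 'for p in ps' body)
def pvStepA (d : PySem.Dict Int ((Int × Int) × List ((Int × Int) × (Int × Int))))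
    (p : (Int × Int) × (Int × Int)) :
    PySem.Dict Int ((Int × Int) × List ((Int × Int) × (Int × Int))) :=
  let w_4 := p.1.2
  let w_5 := p.2.2
  let x := (w_4 + w_5, w_4)
  let state_5 := p.2.1
  match d.get? state_5 with
  | none => d.insert state_5 (x, [p])                       -- state_5 not in best_ps
  | some (bx, bl) =>
    if pvLtX x bx then d.insert state_5 (x, [p])            -- x < best_ps[state_5][0]
    else if x == bx then d.insert state_5 (bx, bl ++ [p])   -- append (in-place mutation)
    else d

def filter_ps (ps : List ((Int × Int) × (Int × Int))) : List ((Int × Int) × (Int × Int)) :=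
  let best_ps := ps.foldl pvStepA PySem.Dict.empty
  -- [p for state_5 in best_ps for p in best_ps[state_5][1]]: iterating the keys and
  -- looking each one up is iterating the items (keys of a dict are unique)
  best_ps.items.flatMap (fun kv => kv.2.2)

-- ===== PORT B =====
-- loop body of B's first pass: best_w[s] = min x per end state
def pvStepW (d : PySem.Dict Int (Int × Int)) (p : (Int × Int) × (Int × Int)) :
    PySem.Dict Int (Int × Int) :=
  let x := (p.1.2 + p.2.2, p.1.2)
  let s := p.2.1
  match d.get? s with
  | none => d.insert s x
  | some bx => if pvLtX x bx then d.insert s x else d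

def filter_ps_alt (ps : List ((Int × Int) × (Int × Int))) : List ((Int × Int) × (Int × Int)) :=
  let best_w := ps.foldl pvStepW PySem.Dict.empty
  -- [p for s in best_w for p in ps if p[1][0] == s and (…) == best_w[s]]
  best_w.items.flatMap (fun sm =>
    ps.filter (fun p => p.2.1 == sm.1 && (p.1.2 + p.2.2, p.1.2) == sm.2))

-- ===== PRECONDITION & SPEC =====
def Spec_filter_ps (ps : List ((Int × Int) × (Int × Int))) (out : List ((Int × Int) × (Int × Int))) : Prop := out = filter_ps_alt ps
instance (ps : List ((Int × Int) × (Int × Int))) (out : List ((Int × Int) × (Int × Int))) : Decidable (Spec_filter_ps ps out) := by unfold Spec_filter_ps; infer_instance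

-- ===== CLAIM (what is proved, stated in full; the proofs are below) =====
def Claim_equal_filter_ps : Prop := ∀ (ps : List ((Int × Int) × (Int × Int))), Dom_filter_ps ps → Spec_filter_ps ps (filter_ps ps)

-- ===== LEMMAS AND PROOFS =====

-- the group condition of B's comprehension, an abbreviation for the proofs
def pvCond (sm : Int × (Int × Int)) (p : (Int × Int) × (Int × Int)) : Bool :=
  p.2.1 == sm.1 && (p.1.2 + p.2.2, p.1.2) == sm.2

lemma pvLtX_irrefl (a : Int × Int) : pvLtX a a = false := by
  simp [pvLtX]

lemma pvLtX_trans {a b c : Int × Int} (h1 : pvLtX a b = true) (h2 : pvLtX b c = true) :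
    pvLtX a c = true := by
  simp only [pvLtX, Bool.or_eq_true, Bool.and_eq_true, decide_eq_true_eq, beq_iff_eq] at *
  omega

-- dict lookup as a find? over the items list
lemma pv_get?_eq {b : Type} (its : List (Int × b)) (s : Int) :
    (PySem.Dict.mk its).get? s = (its.find? (fun kv => kv.1 == s)).map (·.2) := by
  induction its with
  | nil => rfl
  | cons kv rest ih =>
    rw [show (kv :: rest) = (kv.1, kv.2) :: rest by simp, PySem.Dict.get?_mk_cons]
    by_cases h : kv.1 = s
    · simp [List.find?, h]
    · simp only [List.find?, show (kv.1 == s) = false by simpa using h]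
      exact ih

-- lookups in two dicts whose items lists are related by a key-preserving map
lemma pv_get?_corr {bW bA : Type} (dA : PySem.Dict Int bA) (dW : PySem.Dict Int bW)
    (f : Int × bW → bA) (h : dA.items = dW.items.map (fun sm => (sm.1, f sm))) (s : Int) :
    dA.get? s = (dW.get? s).map (fun m => f (s, m)) := by
  obtain ⟨itsA⟩ := dA
  obtain ⟨itsW⟩ := dW
  have h' : itsA = itsW.map (fun sm => (sm.1, f sm)) := h
  subst h'
  rw [pv_get?_eq, pv_get?_eq, List.find?_map]
  have hpred : ((fun kv : Int × bA => kv.1 == s) ∘ fun sm : Int × bW => (sm.1, f sm))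
      = fun sm : Int × bW => sm.1 == s := rfl
  rw [hpred]
  cases hf : itsW.find? (fun sm => sm.1 == s) with
  | none => rfl
  | some sm0 =>
    have h1 : sm0.1 = s := by simpa using List.find?_some hf
    simp [← h1]

-- a key absent from a dict heads no item
lemma pv_not_mem (dW : PySem.Dict Int (Int × Int)) (s : Int) (hW : dW.get? s = none)
    {sm : Int × (Int × Int)} (hsm : sm ∈ dW.items) : sm.1 ≠ s := by
  intro hs
  have hk : s ∈ dW.keys := by
    have := PySem.Dict.mem_keys_of_mem_items (d := dW) (p := sm) hsm
    rwa [hs] at this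
  rw [PySem.Dict.get?_eq_none_iff_not_mem_keys] at hW
  exact hW hk

-- with unique keys, an item whose key already maps to m is (key, m)
lemma pv_val_eq (dW : PySem.Dict Int (Int × Int)) (s : Int) (m : Int × Int)
    (hW : dW.get? s = some m) (hnd : dW.keys.Nodup)
    {sm : Int × (Int × Int)} (hsm : sm ∈ dW.items) (hs : sm.1 = s) : sm = (s, m) := by
  have h1 : dW.get? sm.1 = some sm.2 :=
    PySem.Dict.get?_of_mem_items dW (by simpa using hsm) hnd
  rw [hs, hW] at h1
  have h2 : sm.2 = m := by simpa using h1.symm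
  cases sm; simp_all

lemma pv_inv (l : List ((Int × Int) × (Int × Int))) :
    ((l.foldl pvStepA PySem.Dict.empty).items
      = (l.foldl pvStepW PySem.Dict.empty).items.map
          (fun sm => (sm.1, (sm.2, l.filter (pvCond sm)))))
    ∧ (∀ s, (l.foldl pvStepW PySem.Dict.empty).contains s = l.any (fun p => p.2.1 == s))
    ∧ (∀ sm ∈ (l.foldl pvStepW PySem.Dict.empty).items,
        ∀ p ∈ l, p.2.1 = sm.1 → pvLtX (p.1.2 + p.2.2, p.1.2) sm.2 = false)
    ∧ (l.foldl pvStepW PySem.Dict.empty).keys.Nodup := by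
  induction l using List.reverseRecOn with
  | nil =>
    refine ⟨rfl, fun s => rfl, ?_, ?_⟩
    · intro sm hsm p hp hst
      exact absurd hp (List.not_mem_nil)
    · exact List.nodup_nil
  | append_singleton l p ih =>
    obtain ⟨ih1, ih2, ih3, ih4⟩ := ih
    simp only [List.foldl_append, List.foldl_cons, List.foldl_nil]
    set W := l.foldl pvStepW PySem.Dict.empty with hWdef
    set A := l.foldl pvStepA PySem.Dict.empty with hAdef
    have hA : A.get? p.2.1
        = (W.get? p.2.1).map (fun m => ((m, l.filter (pvCond (p.2.1, m))))) :=
      pv_get?_corr A W (fun sm => (sm.2, l.filter (pvCond sm))) ih1 p.2.1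
    have hx : pvCond (p.2.1, (p.1.2 + p.2.2, p.1.2)) p = true := by simp [pvCond]
    cases hW : W.get? p.2.1 with
    | none =>
      rw [hW] at hA; simp only [Option.map_none] at hA
      have hcW : W.contains p.2.1 = false := by
        rw [PySem.Dict.contains_eq_isSome_get?, hW]; rfl
      have hcA : A.contains p.2.1 = false := by
        rw [PySem.Dict.contains_eq_isSome_get?, hA]; rfl
      have hany : l.any (fun p' => p'.2.1 == p.2.1) = false := by rw [← ih2]; exact hcW
      have hnone : ∀ p' ∈ l, (p'.2.1 == p.2.1) = false := by
        intro p' hp'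
        by_contra hc
        have hT : l.any (fun p' => p'.2.1 == p.2.1) = true :=
          List.any_eq_true.mpr ⟨p', hp', by revert hc; cases (p'.2.1 == p.2.1) <;> simp⟩
        rw [hany] at hT; exact absurd hT (by simp)
      have hfl : l.filter (pvCond (p.2.1, (p.1.2 + p.2.2, p.1.2))) = [] := by
        refine List.filter_eq_nil_iff.mpr (fun p' hp' => ?_)
        simp only [pvCond, Bool.and_eq_true, not_and]
        intro hst
        exact absurd hst (by simpa using hnone p' hp')
      simp only [pvStepA, pvStepW, hA, hW]
      refine ⟨?_, ?_, ?_, ?_⟩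
      · rw [PySem.Dict.items_insert_of_not_contains _ _ hcA,
            PySem.Dict.items_insert_of_not_contains _ _ hcW, List.map_append, ih1]
        congr 1
        · refine List.map_congr_left (fun sm hsm => ?_)
          have hne := pv_not_mem W p.2.1 hW hsm
          have hc : pvCond sm p = false := by
            simp only [pvCond, Bool.and_eq_false_iff]
            left; simpa using fun h => hne h.symm
          simp [List.filter_append, hc]
        · simp [List.filter_append, hfl, List.filter, hx]
      · intro s'
        rw [PySem.Dict.contains_insert]
        by_cases hs : s' = p.2.1
        · simp [hs, ih2, List.any_append]
        · simp [ih2, List.any_append, show (s' == p.2.1) = false by simpa using hs,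
            show (p.2.1 == s') = false by simpa using fun h => hs h.symm]
      · intro sm hsm p' hp' hst
        rw [PySem.Dict.items_insert_of_not_contains _ _ hcW] at hsm
        rcases List.mem_append.mp hsm with hold | hnew
        · rcases List.mem_append.mp hp' with hl | hp
          · exact ih3 sm hold p' hl hst
          · have hpp : p' = p := by simpa using hp
            subst hpp
            exact absurd hst.symm (pv_not_mem W _ hW hold)
        · have hsm' : sm = (p.2.1, (p.1.2 + p.2.2, p.1.2)) := by simpa using hnew
          subst hsm'
          rcases List.mem_append.mp hp' with hl | hp
          · exact absurd hst (by simpa using hnone p' hl)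
          · have hpp : p' = p := by simpa using hp
            subst hpp
            exact pvLtX_irrefl _
      · rw [PySem.Dict.keys_insert_of_not_contains _ _ hcW]
        have hs : p.2.1 ∉ W.keys := by
          intro hmem
          have hT := (PySem.Dict.contains_iff_mem_keys (d := W) (k := p.2.1)).mpr hmem
          rw [hcW] at hT; exact absurd hT (by simp)
        rw [List.nodup_append]
        refine ⟨ih4, List.nodup_singleton _, ?_⟩
        intro a ha b hb
        rw [List.mem_singleton] at hb
        subst hb
        exact fun hEq => hs (hEq ▸ ha)
    | some m =>
      rw [hW] at hA; simp only [Option.map_some] at hA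
      have hcW : W.contains p.2.1 = true := by
        rw [PySem.Dict.contains_eq_isSome_get?, hW]; rfl
      have hcA : A.contains p.2.1 = true := by
        rw [PySem.Dict.contains_eq_isSome_get?, hA]; rfl
      have hmem : (p.2.1, m) ∈ W.items := PySem.Dict.mem_items_of_get?_eq_some W hW
      have hanyT : l.any (fun p' => p'.2.1 == p.2.1) = true := by rw [← ih2]; exact hcW
      simp only [pvStepA, pvStepW, hA, hW]
      by_cases hlt : pvLtX (p.1.2 + p.2.2, p.1.2) m = true
      · simp only [hlt, if_true]
        have hfl : l.filter (pvCond (p.2.1, (p.1.2 + p.2.2, p.1.2))) = [] := by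
          refine List.filter_eq_nil_iff.mpr (fun p' hp' => ?_)
          simp only [pvCond, Bool.and_eq_true, not_and]
          intro hst hxv
          have h3 := ih3 (p.2.1, m) hmem p' hp' (by simpa using hst)
          have hxv' : ((p'.1.2 + p'.2.2, p'.1.2) : Int × Int) = (p.1.2 + p.2.2, p.1.2) := by
            simpa using hxv
          rw [hxv', hlt] at h3
          exact absurd h3 (by simp)
        refine ⟨?_, ?_, ?_, ?_⟩
        · rw [PySem.Dict.items_insert_of_contains _ _ hcA,
              PySem.Dict.items_insert_of_contains _ _ hcW, ih1, List.map_map, List.map_map]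
          refine List.map_congr_left (fun sm hsm => ?_)
          by_cases hk : sm.1 = p.2.1
          · simp [Function.comp, hk, List.filter_append, hfl, List.filter, hx]
          · have hc : pvCond sm p = false := by
              simp only [pvCond, Bool.and_eq_false_iff]
              left; simpa using fun h => hk h.symm
            simp [Function.comp, show (sm.1 == p.2.1) = false by simpa using hk,
              List.filter_append, hc]
        · intro s'
          rw [PySem.Dict.contains_insert]
          by_cases hs : s' = p.2.1
          · simp [hs, ih2, List.any_append]
          · simp [ih2, List.any_append, show (s' == p.2.1) = false by simpa using hs,
              show (p.2.1 == s') = false by simpa using fun h => hs h.symm]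
        · intro sm hsm p' hp' hst
          rw [PySem.Dict.items_insert_of_contains _ _ hcW] at hsm
          rcases List.mem_map.mp hsm with ⟨sm0, hsm0, hval⟩
          by_cases hk : sm0.1 = p.2.1
          · rw [if_pos (by simpa using hk)] at hval
            subst hval
            rcases List.mem_append.mp hp' with hl | hp
            · show pvLtX (p'.1.2 + p'.2.2, p'.1.2) (p.1.2 + p.2.2, p.1.2) = false
              by_contra hc
              have hc' : pvLtX (p'.1.2 + p'.2.2, p'.1.2) (p.1.2 + p.2.2, p.1.2) = true := by
                cases h : pvLtX (p'.1.2 + p'.2.2, p'.1.2) (p.1.2 + p.2.2, p.1.2)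
                · exact absurd h hc
                · rfl
              have htr := pvLtX_trans hc' hlt
              have h3 : pvLtX (p'.1.2 + p'.2.2, p'.1.2) m = false :=
                ih3 (p.2.1, m) hmem p' hl (by simpa using hst)
              rw [htr] at h3
              exact absurd h3 (by simp)
            · have hpp : p' = p := by simpa using hp
              subst hpp
              exact pvLtX_irrefl _
          · rw [if_neg (by simpa using hk)] at hval
            subst hval
            rcases List.mem_append.mp hp' with hl | hp
            · exact ih3 sm0 hsm0 p' hl hst
            · have hpp : p' = p := by simpa using hp
              subst hpp
              exact absurd hst.symm hk
        · rw [PySem.Dict.keys_insert_of_contains _ _ hcW]; exact ih4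
      · have hltF : pvLtX (p.1.2 + p.2.2, p.1.2) m = false := by
          cases h : pvLtX (p.1.2 + p.2.2, p.1.2) m
          · rfl
          · exact absurd h hlt
        simp only [hltF, if_false, Bool.false_eq_true]
        by_cases heq : ((p.1.2 + p.2.2, p.1.2) : Int × Int) = m
        · simp only [show ((p.1.2 + p.2.2, p.1.2) == m) = true by simpa using heq, if_true]
          have hcnd : pvCond (p.2.1, m) p = true := by simp [pvCond, heq]
          refine ⟨?_, ?_, ?_, ?_⟩
          · rw [PySem.Dict.items_insert_of_contains _ _ hcA, ih1, List.map_map]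
            refine List.map_congr_left (fun sm hsm => ?_)
            by_cases hk : sm.1 = p.2.1
            · have hsm' : sm = (p.2.1, m) := pv_val_eq W p.2.1 m hW ih4 hsm hk
              subst hsm'
              simp [Function.comp, List.filter_append, hcnd, List.filter]
            · have hc : pvCond sm p = false := by
                simp only [pvCond, Bool.and_eq_false_iff]
                left; simpa using fun h => hk h.symm
              simp [Function.comp, show (sm.1 == p.2.1) = false by simpa using hk,
                List.filter_append, hc]
          · intro s'
            by_cases hs : s' = p.2.1
            · simp [hs, ih2, List.any_append, hanyT]
            · simp [ih2, List.any_append,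
                show (p.2.1 == s') = false by simpa using fun h => hs h.symm]
          · intro sm hsm p' hp' hst
            rcases List.mem_append.mp hp' with hl | hp
            · exact ih3 sm hsm p' hl hst
            · have hpp : p' = p := by simpa using hp
              subst hpp
              have hsm' : sm = (_, m) := pv_val_eq W _ m hW ih4 hsm hst.symm
              subst hsm'
              exact hltF
          · exact ih4
        · simp only [show ((p.1.2 + p.2.2, p.1.2) == m) = false by simpa using heq,
            if_false, Bool.false_eq_true]
          refine ⟨?_, ?_, ?_, ?_⟩
          · rw [ih1]
            refine List.map_congr_left (fun sm hsm => ?_)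
            by_cases hk : sm.1 = p.2.1
            · have hsm' : sm = (p.2.1, m) := pv_val_eq W p.2.1 m hW ih4 hsm hk
              subst hsm'
              have hc : pvCond (p.2.1, m) p = false := by
                simp only [pvCond, Bool.and_eq_false_iff]
                right; simpa using heq
              simp [List.filter_append, hc]
            · have hc : pvCond sm p = false := by
                simp only [pvCond, Bool.and_eq_false_iff]
                left; simpa using fun h => hk h.symm
              simp [List.filter_append, hc]
          · intro s'
            by_cases hs : s' = p.2.1
            · simp [hs, ih2, List.any_append, hanyT]
            · simp [ih2, List.any_append,
                show (p.2.1 == s') = false by simpa using fun h => hs h.symm]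
          · intro sm hsm p' hp' hst
            rcases List.mem_append.mp hp' with hl | hp
            · exact ih3 sm hsm p' hl hst
            · have hpp : p' = p := by simpa using hp
              subst hpp
              have hsm' : sm = (_, m) := pv_val_eq W _ m hW ih4 hsm hst.symm
              subst hsm'
              exact hltF
          · exact ih4

theorem filter_ps_spec : Claim_equal_filter_ps := by
  intro ps _
  simp only [Spec_filter_ps, filter_ps, filter_ps_alt]
  rw [(pv_inv ps).1, List.flatMap_map]
  rfl
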